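-- pv_equiv track=rewrite | github.com/cache999/pokeagent | utils/custom_state_formatter.py | format_grid_for_llm
-- ===== SOURCE A (Python) =====
-- def format_grid_for_llm(grid, show_coords=True):
--     """Format a grid of symbols into a string for LLM input."""
--     lines = []
--     width = len(grid[0])
--     num_places = None
--
--     if show_coords:
--         num_places = len(str(width))
--
--         for place in reversed(range(num_places)):
--             line = [' ' * (num_places + 2)]  # padding
--
--             base = (10 ** place)
--             num_values = width // base  # number of values in that place, e.g. 0-42 for tens: 4
--
--             # n[-1] here because
--
--             [line.extend([str(n)[-1]] * base) for n in range(0, num_values)]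
--             line += [str(num_values)[-1]] * (width % base)
--             lines.append(" ".join(line))
--
--     # header bar
--     lines.append('-' * (len(lines[-1])))
--
--     for ri, row in enumerate(grid):
--         line = [f'{str(ri).rjust(num_places)} |'] if show_coords else []
--         line += row
--         lines.append(" ".join(line))
--
--     map_display = "\n".join(lines)
--
--     return map_display
-- ===== SOURCE B (Python) =====
-- def format_grid_for_llm(grid, show_coords=True):
--     """Format a grid of symbols into a string for LLM input."""
--     width = len(grid[0])
--     if not show_coords:
--         # A raises IndexError here (lines[-1] on an empty list); plain rows are the natural output
--         return "\n".join(" ".join(row) for row in grid)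
--     num_places = len(str(width))
--     pad = ' ' * (num_places + 2)
--     lines = [" ".join([pad] + [str((c // 10 ** place) % 10) for c in range(width)])
--              for place in reversed(range(num_places))]
--     lines.append('-' * len(lines[-1]))
--     for ri, row in enumerate(grid):
--         lines.append(" ".join([str(ri).rjust(num_places) + ' |'] + row))
--     return "\n".join(lines)
-- ===== Notes on version B (the rewrite author's own statement) =====
-- stated objective: simpler
-- what changed: The header digit rows are computed per column as str((c // 10**place) % 10) instead of A's run-length construction (extending the line with [str(n)[-1]]*base for each value plus a remainder tail), and the whole function becomes a comprehension-based early-return layout.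
import Mathlib
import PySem

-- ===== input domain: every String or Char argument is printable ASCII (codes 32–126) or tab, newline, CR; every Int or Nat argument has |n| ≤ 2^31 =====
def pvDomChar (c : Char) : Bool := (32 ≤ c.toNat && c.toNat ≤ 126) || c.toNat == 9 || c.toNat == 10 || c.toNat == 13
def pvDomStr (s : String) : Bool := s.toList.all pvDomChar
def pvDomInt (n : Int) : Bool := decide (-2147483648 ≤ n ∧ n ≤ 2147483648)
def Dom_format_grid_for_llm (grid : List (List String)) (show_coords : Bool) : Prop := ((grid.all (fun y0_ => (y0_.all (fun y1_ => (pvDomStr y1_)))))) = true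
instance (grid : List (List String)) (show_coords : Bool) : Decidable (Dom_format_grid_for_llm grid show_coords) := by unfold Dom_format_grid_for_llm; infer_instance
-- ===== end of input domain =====

-- B replaces A's run-length digit-row construction (extend [str(n)[-1]]*base per value plus a
-- remainder tail) by computing each column's digit directly as str((c // 10**place) % 10): simpler.

-- exact port of str.rjust(w): pad on the left with spaces when the string is shorter than w (used by both Pythons)
def pyRjust (s : String) (w : Nat) : String :=
  String.ofList (List.replicate (w - s.toList.length) ' ' ++ s.toList)

-- ===== PORT A =====
-- str(n)[-1] for n ≥ 0: last character of the decimal representation, as a 1-char string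
def lastDigitStr (n : Nat) : String :=
  String.ofList [PySem.List.pyGetD (PySem.Int.toChars (n : Int)) (-1) ' ']

def format_grid_for_llm (grid : List (List String)) (show_coords : Bool) : String :=
  let width := (grid.headD []).length   -- grid[0]; Pre_ excludes grid = [] (IndexError)
  let num_places := (PySem.Int.toChars (width : Int)).length   -- len(str(width)) (None when show_coords is false, then unused)
  let lines : List String :=
    if show_coords then
      ((List.range num_places).reverse).map (fun place =>
        let base := 10 ^ place
        let num_values := width / base
        let line : List String :=
          [String.ofList (List.replicate (num_places + 2) ' ')]
          ++ (List.range num_values).flatMap (fun n => List.replicate base (lastDigitStr n))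
          ++ List.replicate (width % base) (lastDigitStr num_values)
        PySem.Str.join " " line)
    else []
  -- lines[-1]: raises IndexError when show_coords is false (lines = []); Pre_ excludes that
  let lines := lines ++ [String.ofList (List.replicate (PySem.Str.len (lines.getLastD "")).toNat '-')]
  let lines := lines ++ (PySem.List.enumerate grid 0).map (fun p =>
      PySem.Str.join " "
        ((if show_coords then [pyRjust (PySem.Int.toStr p.1) num_places ++ " |"] else []) ++ p.2))
  PySem.Str.join "\n" lines

-- ===== PORT B =====
def format_grid_for_llm_alt (grid : List (List String)) (show_coords : Bool) : String :=
  let width := (grid.headD []).length   -- grid[0]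
  if show_coords = false then
    PySem.Str.join "\n" (grid.map (fun row => PySem.Str.join " " row))
  else
    let num_places := (PySem.Int.toChars (width : Int)).length
    let pad := String.ofList (List.replicate (num_places + 2) ' ')
    let header := ((List.range num_places).reverse).map (fun place =>
      PySem.Str.join " " (pad :: (List.range width).map (fun c =>
        PySem.Int.toStr ((c / 10 ^ place % 10 : Nat) : Int))))   -- str((c // 10**place) % 10), all Nats
    let lines := header ++ [String.ofList (List.replicate (PySem.Str.len (header.getLastD "")).toNat '-')]
    let lines := lines ++ (PySem.List.enumerate grid 0).map (fun p =>
      PySem.Str.join " " ((pyRjust (PySem.Int.toStr p.1) num_places ++ " |") :: p.2))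
    PySem.Str.join "\n" lines

-- ===== PRECONDITION & SPEC =====
-- Pre_ excludes exactly the inputs on which A raises IndexError: grid = [] (grid[0]) and
-- show_coords = False (lines[-1] on the empty header list).
def Pre_format_grid_for_llm (grid : List (List String)) (show_coords : Bool) : Prop :=
  grid ≠ [] ∧ show_coords = true
instance (grid : List (List String)) (show_coords : Bool) : Decidable (Pre_format_grid_for_llm grid show_coords) := by unfold Pre_format_grid_for_llm; infer_instance

def pvWitness_format_grid_for_llm : List (List String) × Bool := ([["a", "b"], ["c", "d"]], true)

def Spec_format_grid_for_llm (grid : List (List String)) (show_coords : Bool) (out : String) : Prop := out = format_grid_for_llm_alt grid show_coords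
instance (grid : List (List String)) (show_coords : Bool) (out : String) : Decidable (Spec_format_grid_for_llm grid show_coords out) := by unfold Spec_format_grid_for_llm; infer_instance

-- ===== CLAIM (what is proved, stated in full; the proofs are below) =====
def Claim_equal_format_grid_for_llm : Prop := ∀ (grid : List (List String)) (show_coords : Bool), Dom_format_grid_for_llm grid show_coords → Pre_format_grid_for_llm grid show_coords → Spec_format_grid_for_llm grid show_coords (format_grid_for_llm grid show_coords)

-- ===== LEMMAS AND PROOFS =====

-- accumulator law of core's Nat.toDigitsCore (any fuel)
lemma toDigitsCore_acc : ∀ (f n : Nat) (l : List Char),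
    Nat.toDigitsCore 10 f n l = Nat.toDigitsCore 10 f n [] ++ l := by
  intro f
  induction f with
  | zero => intro n l; simp [Nat.toDigitsCore]
  | succ f ih =>
    intro n l
    simp only [Nat.toDigitsCore]
    by_cases h : n / 10 = 0
    · simp [h]
    · simp only [h]
      rw [ih (n / 10) _, ih (n / 10) [Nat.digitChar (n % 10)]]
      simp

-- the decimal representation ends in the digit character of n % 10
lemma toDigits_ten (n : Nat) :
    Nat.toDigits 10 n
      = (if n / 10 = 0 then [] else Nat.toDigitsCore 10 n (n / 10) []) ++ [Nat.digitChar (n % 10)] := by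
  unfold Nat.toDigits
  simp only [Nat.toDigitsCore]
  by_cases h : n / 10 = 0
  · simp [h]
  · simp only [h]
    rw [toDigitsCore_acc]
    simp

-- str(n)[-1] = str(n % 10) for n : Nat
lemma lastDigitStr_eq (n : Nat) :
    lastDigitStr n = PySem.Int.toStr ((n % 10 : Nat) : Int) := by
  unfold lastDigitStr PySem.Int.toStr PySem.Int.toChars
  have h1 : ¬ ((n : Int) < 0) := Int.not_lt.mpr (Int.natCast_nonneg n)
  have h2 : ¬ (((n % 10 : Nat) : Int) < 0) := Int.not_lt.mpr (Int.natCast_nonneg _)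
  rw [if_neg h1, if_neg h2]
  simp only [Int.toNat_natCast]
  rw [toDigits_ten n, PySem.List.pyGetD_neg_one_append_singleton]
  have h3 : (n % 10) / 10 = 0 := Nat.div_eq_of_lt (Nat.mod_lt _ (by omega))
  have h4 : n % 10 % 10 = n % 10 := by omega
  rw [toDigits_ten (n % 10)]
  simp [h3, h4]

-- A's run-length construction of a digit row equals the direct per-column computation
lemma runlen {α : Type} (d : Nat → α) (base : Nat) (hb : 0 < base) : ∀ (w : Nat),
    (List.range (w / base)).flatMap (fun n => List.replicate base (d n))
      ++ List.replicate (w % base) (d (w / base))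
    = (List.range w).map (fun c => d (c / base)) := by
  intro w
  induction w with
  | zero => simp
  | succ w ih =>
    have hr : w % base < base := Nat.mod_lt _ hb
    have hwd : base * (w / base) + w % base = w := by
      have := Nat.div_add_mod w base; omega
    rw [List.range_succ, List.map_append]
    by_cases hc : w % base + 1 = base
    · have hm : base * (w / base + 1) = base * (w / base) + base := by ring
      have hdiv : (w + 1) / base = w / base + 1 ∧ (w + 1) % base = 0 :=
        (Nat.div_mod_unique hb).mpr ⟨by omega, hb⟩
      rw [hdiv.1, hdiv.2, List.range_succ, List.flatMap_append]
      simp only [List.flatMap_cons, List.flatMap_nil, List.append_nil, List.replicate]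
      rw [← ih]
      have : List.replicate base (d (w / base))
          = List.replicate (w % base) (d (w / base)) ++ [d (w / base)] := by
        rw [← List.replicate_succ']; rw [hc]
      rw [this]
      simp
    · have hdiv : (w + 1) / base = w / base ∧ (w + 1) % base = w % base + 1 :=
        (Nat.div_mod_unique hb).mpr ⟨by omega, by omega⟩
      rw [hdiv.1, hdiv.2, List.replicate_succ', ← List.append_assoc, ih]
      simp

-- per-place: A's header line equals B's header line
lemma line_eq (width np place : Nat) :
    PySem.Str.join " "
      ([String.ofList (List.replicate (np + 2) ' ')]
        ++ (List.range (width / 10 ^ place)).flatMap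
             (fun n => List.replicate (10 ^ place) (lastDigitStr n))
        ++ List.replicate (width % 10 ^ place) (lastDigitStr (width / 10 ^ place)))
    = PySem.Str.join " "
        (String.ofList (List.replicate (np + 2) ' ')
          :: (List.range width).map (fun c => PySem.Int.toStr ((c / 10 ^ place % 10 : Nat) : Int))) := by
  congr 1
  rw [List.append_assoc, runlen lastDigitStr (10 ^ place) (by positivity) width,
    List.singleton_append]
  exact congrArg _ (List.map_congr_left (fun c _ => lastDigitStr_eq (c / 10 ^ place)))

-- ===== VERDICT (by name: the statement is the Claim_ definition above) =====
theorem format_grid_for_llm_spec : Claim_equal_format_grid_for_llm := by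
  intro grid show_coords _ hpre
  rcases hpre with ⟨-, hsc⟩
  subst hsc
  unfold Spec_format_grid_for_llm
  simp only [format_grid_for_llm, format_grid_for_llm_alt, reduceIte, Bool.true_eq_false,
    if_false]
  rw [List.map_congr_left (fun place _ =>
    line_eq ((grid.headD []).length) ((PySem.Int.toChars (((grid.headD []).length : Int))).length) place)]
  simp only [List.singleton_append]
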